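-- pv_equiv track=rewrite | github.com/lkr0n/mygunzip | dump.py | construct_huffman
-- ===== SOURCE A (Python) =====
-- def construct_huffman(alphabet, code_lengths):
--
--     # collect characters in alphabet of the same code length into list
--     char_by_code_len = dict()
--     for character, length in zip(alphabet, code_lengths):
--         if length:
--             char_by_code_len.setdefault(length, []).append(character)
--
--     # recreate huffman codes from code lenghts
--     huffman_code = dict()
--     min_code = 0
--     for length in range(max(char_by_code_len) + 1):
--         if length in char_by_code_len:
--             characters = char_by_code_len[length]
--
--             for i, character in enumerate(sorted(characters)):
--                 huffman_code[ (length, min_code + i) ] = character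
--
--             min_code = (min_code + len(characters)) << 1
--         else:
--             min_code <<= 1
--
--     return huffman_code
-- ===== SOURCE B (Python) =====
-- def construct_huffman(alphabet, code_lengths):
--     # canonical Huffman codes computed per symbol by a closed-form count,
--     # with no bucket dict, no min_code accumulator and no next_code table
--     pairs = sorted((l, c) for c, l in zip(alphabet, code_lengths) if l > 0)
--     huffman_code = {}
--     for i, (length, character) in enumerate(pairs):
--         first = sum(1 << (length - l) for l, _ in pairs if l < length)
--         shorter = sum(1 for l, _ in pairs if l < length)
--         huffman_code[(length, first + i - shorter)] = character
--     return huffman_code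
-- ===== Notes on version B (the rewrite author's own statement) =====
-- stated objective: alternative
-- what changed: A buckets characters per length into a dict of lists and scans lengths 0..max carrying a sequential min_code accumulator; B drops the buckets and the accumulator entirely and computes each symbol's code independently by a closed-form count over the pair list (first = sum of 1<<(length-l) over shorter lengths, rank = position in the single sorted pair list minus the number of shorter-length pairs).
import Mathlib
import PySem

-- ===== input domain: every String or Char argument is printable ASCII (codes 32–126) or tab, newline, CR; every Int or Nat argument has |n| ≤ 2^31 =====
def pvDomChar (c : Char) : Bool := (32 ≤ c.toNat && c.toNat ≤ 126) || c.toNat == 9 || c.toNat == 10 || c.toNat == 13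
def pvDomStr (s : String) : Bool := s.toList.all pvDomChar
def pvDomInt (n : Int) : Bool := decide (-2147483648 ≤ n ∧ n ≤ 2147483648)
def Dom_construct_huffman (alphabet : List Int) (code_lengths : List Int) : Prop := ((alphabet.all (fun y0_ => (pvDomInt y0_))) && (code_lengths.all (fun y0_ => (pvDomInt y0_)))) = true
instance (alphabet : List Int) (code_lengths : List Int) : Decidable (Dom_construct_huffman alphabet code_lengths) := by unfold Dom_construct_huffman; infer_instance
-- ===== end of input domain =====

-- B drops A's per-length bucket dict and sequential min_code accumulator and computes each
-- symbol's code independently by a closed-form count over the sorted pair list (alternative decomposition).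

-- ===== PORT A =====
-- 'setdefault(l, []).append(c)' is exactly 'd[l] = d.get(l, []) + [c]', i.e. Dict.modify l [] (· ++ [c]).
-- 'x << 1' on Python ints is exactly 'x * 2'.
def construct_huffman (alphabet : List Int) (code_lengths : List Int) : List (Int × Int × Int) :=
  let d := (alphabet.zip code_lengths).foldl
    (fun d p => if p.2 ≠ 0 then d.modify p.2 [] (fun v => v ++ [p.1]) else d) PySem.Dict.empty
  match PySem.List.max? d.keys (fun x => x) with
  | none => []   -- Python raises ValueError (max of an empty dict) here; excluded by Pre_
  | some m =>
    let st := (PySem.List.pyRange 0 (m + 1) 1).foldl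
      (fun (st : PySem.Dict (Int × Int) Int × Int) l =>
        match d.get? l with
        | some characters =>
          ((PySem.List.enumerate (PySem.List.sorted characters (fun x => x) false) 0).foldl
             (fun h p => h.insert (l, st.2 + p.1) p.2) st.1,
           (st.2 + characters.length) * 2)
        | none => (st.1, st.2 * 2)) (PySem.Dict.empty, 0)
    st.1.items.map (fun q => (q.1.1, q.1.2, q.2))

-- ===== PORT B =====
-- 'sum(1 << (length - l) …)' : each shift has length - l ≥ 1, so '1 << (length - l)' is exactly
-- 2 ^ (length - l).toNat; 'sum(1 for …)' is the sum of a constant-1 map over the same filter.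
def construct_huffman_alt (alphabet : List Int) (code_lengths : List Int) : List (Int × Int × Int) :=
  let pairs := PySem.List.sorted2
    (((alphabet.zip code_lengths).filter (fun p => decide (0 < p.2))).map (fun p => (p.2, p.1)))
    (fun p => p.1) (fun p => p.2) false
  let res := (PySem.List.enumerate pairs 0).foldl
    (fun (h : PySem.Dict (Int × Int) Int) q =>
      h.insert (q.2.1,
        ((pairs.filter (fun r => decide (r.1 < q.2.1))).map (fun r => (2 : Int) ^ (q.2.1 - r.1).toNat)).sum
          + q.1
          - ((pairs.filter (fun r => decide (r.1 < q.2.1))).map (fun _ => (1 : Int))).sum)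
        q.2.2)
    PySem.Dict.empty
  res.items.map (fun q => (q.1.1, q.1.2, q.2))

-- ===== PRECONDITION & SPEC =====
-- Pre_ excludes exactly the inputs where A raises ValueError: every zipped code length is 0 (including empty zip).
def Pre_construct_huffman (alphabet : List Int) (code_lengths : List Int) : Prop :=
  ∃ p ∈ alphabet.zip code_lengths, p.2 ≠ 0
instance (alphabet : List Int) (code_lengths : List Int) : Decidable (Pre_construct_huffman alphabet code_lengths) := by unfold Pre_construct_huffman; infer_instance
def pvWitness_construct_huffman : List Int × List Int := ([10, 20, 30, 40], [2, 1, 3, 3])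

def Spec_construct_huffman (alphabet : List Int) (code_lengths : List Int) (out : List (Int × Int × Int)) : Prop := out = construct_huffman_alt alphabet code_lengths
instance (alphabet : List Int) (code_lengths : List Int) (out : List (Int × Int × Int)) : Decidable (Spec_construct_huffman alphabet code_lengths out) := by unfold Spec_construct_huffman; infer_instance

-- ===== CLAIM (what is proved, stated in full; the proofs are below) =====
def Claim_equal_construct_huffman : Prop := ∀ (alphabet : List Int) (code_lengths : List Int), Dom_construct_huffman alphabet code_lengths → Pre_construct_huffman alphabet code_lengths → Spec_construct_huffman alphabet code_lengths (construct_huffman alphabet code_lengths)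

-- ===== LEMMAS AND PROOFS =====

def pvChars (zs : List (Int × Int)) (l : Int) : List Int :=
  (zs.filter (fun p => p.1 == l)).map (fun p => p.2)

-- ---- generic list/fold helpers ----

-- a loop with an 'if' is a loop over the filter
theorem pv_foldl_if_filter {α β : Type} (q : α → Prop) [DecidablePred q] (f : β → α → β)
    (xs : List α) (i : β) :
    xs.foldl (fun acc x => if q x then f acc x else acc) i
      = (xs.filter (fun x => decide (q x))).foldl f i := by
  induction xs generalizing i with
  | nil => rfl
  | cons a t ih => by_cases h : q a <;> simp [h, ih]

-- ---- A's bucket dict, characterized ----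

def pvZs (alphabet code_lengths : List Int) : List (Int × Int) :=
  ((alphabet.zip code_lengths).filter (fun p => decide (p.2 ≠ 0))).map (fun p => (p.2, p.1))

def pvZs' (xs : List (Int × Int)) : List (Int × Int) :=
  (xs.filter (fun p => decide (p.2 ≠ 0))).map (fun p => (p.2, p.1))

def pvPos' (xs : List (Int × Int)) : List (Int × Int) :=
  (xs.filter (fun p => decide (0 < p.2))).map (fun p => (p.2, p.1))

theorem pvZs'_eq (xs : List (Int × Int)) :
    pvZs' xs = (xs.filter (fun p => decide (p.2 ≠ 0))).map (fun p => (p.2, p.1)) := rfl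

theorem pvPos'_eq (xs : List (Int × Int)) :
    pvPos' xs = (xs.filter (fun p => decide (0 < p.2))).map (fun p => (p.2, p.1)) := rfl

def pvD (zs : List (Int × Int)) : PySem.Dict Int (List Int) :=
  zs.foldl (fun d p => d.modify p.1 [] (fun v => v ++ [p.2])) PySem.Dict.empty

theorem pvD_getD (zs : List (Int × Int)) (l : Int) : (pvD zs).getD l [] = pvChars zs l := by
  simp [pvD, pvChars, PySem.Dict.getD_foldl_modify_append]

theorem pvD_keys (zs : List (Int × Int)) :
    (pvD zs).keys = PySem.Set.ofList (zs.map (fun p => p.1)) := by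
  have h := PySem.Dict.keys_foldl_modify_key (l := zs) (key := fun p => p.1) (d0 := ([] : List Int))
    (f := fun _ p => fun v => v ++ [p.2]) (d := PySem.Dict.empty)
  simpa [pvD, PySem.Set.update_empty] using h

theorem pv_mem_keys_iff (zs : List (Int × Int)) (l : Int) :
    l ∈ (pvD zs).keys ↔ pvChars zs l ≠ [] := by
  rw [pvD_keys, PySem.Set.mem_ofList]
  simp [pvChars, List.filter_eq_nil_iff]

theorem pvD_get? (zs : List (Int × Int)) (l : Int) :
    (pvD zs).get? l = if pvChars zs l = [] then none else some (pvChars zs l) := by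
  by_cases h : pvChars zs l = []
  · rw [if_pos h, PySem.Dict.get?_eq_none_iff_not_mem_keys, pv_mem_keys_iff]; simp [h]
  · rw [if_neg h]
    have hmem : l ∈ (pvD zs).keys := (pv_mem_keys_iff zs l).2 h
    have hc : (pvD zs).contains l = true := (PySem.Dict.contains_iff_mem_keys _ _).2 hmem
    rw [PySem.Dict.contains_eq_isSome_get?] at hc
    cases hg : (pvD zs).get? l with
    | none => rw [hg] at hc; simp at hc
    | some v =>
      have := pvD_getD zs l
      rw [PySem.Dict.getD_eq_get?_getD, hg] at this
      simp only [Option.getD_some] at this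
      rw [this]

-- ---- the lexicographic order used by B's single sort ----

def pvLe (a b : Int × Int) : Prop := a.1 < b.1 ∨ (a.1 = b.1 ∧ a.2 ≤ b.2)

def pvBef (a b : Int × Int) : Bool :=
  decide (a.1 < b.1) || (!decide (b.1 < a.1) && decide (a.2 < b.2))

theorem pvBef_false_iff (a b : Int × Int) : pvBef a b = false ↔ pvLe b a := by
  simp [pvBef, pvLe]; omega

theorem pvBef_true_le (a b : Int × Int) (h : pvBef a b = true) : pvLe a b := by
  simp [pvBef] at h; simp [pvLe]; omega

theorem pvLe_trans {a b c : Int × Int} (h1 : pvLe a b) (h2 : pvLe b c) : pvLe a c := by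
  simp [pvLe] at *; omega

theorem pvLe_antisymm {a b : Int × Int} (h1 : pvLe a b) (h2 : pvLe b a) : a = b := by
  simp [pvLe] at *
  have : a.1 = b.1 ∧ a.2 = b.2 := by omega
  exact Prod.ext this.1 this.2

theorem pv_pairwise_insertBy (x : Int × Int) (l : List (Int × Int))
    (hl : l.Pairwise pvLe) : (PySem.List.insertBy pvBef x l).Pairwise pvLe := by
  induction l with
  | nil => simp [PySem.List.insertBy]
  | cons y ys ih =>
    rw [List.pairwise_cons] at hl
    show (if pvBef x y = true then x :: y :: ys else y :: PySem.List.insertBy pvBef x ys).Pairwise pvLe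
    by_cases h : pvBef x y = true
    · rw [if_pos h]
      have hxy : pvLe x y := pvBef_true_le _ _ h
      refine List.Pairwise.cons ?_ (List.Pairwise.cons hl.1 hl.2)
      intro z hz
      rcases List.mem_cons.1 hz with rfl | hz
      · exact hxy
      · exact pvLe_trans hxy (hl.1 z hz)
    · rw [if_neg h]
      have hyx : pvLe y x := (pvBef_false_iff _ _).1 (by revert h; cases pvBef x y <;> simp)
      refine List.Pairwise.cons ?_ (ih hl.2)
      intro z hz
      rcases (PySem.List.mem_insertBy _ _ _ _).1 hz with rfl | hz
      · exact hyx
      · exact hl.1 z hz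

theorem pv_sorted2_eq_foldl (xs : List (Int × Int)) :
    PySem.List.sorted2 xs (fun p => p.1) (fun p => p.2) false
      = xs.foldl (fun acc x => PySem.List.insertBy pvBef x acc) [] := rfl

theorem pv_pairwise_sorted2 (xs : List (Int × Int)) :
    (PySem.List.sorted2 xs (fun p => p.1) (fun p => p.2) false).Pairwise pvLe := by
  rw [pv_sorted2_eq_foldl]
  suffices h : ∀ (acc : List (Int × Int)), acc.Pairwise pvLe →
      (xs.foldl (fun acc x => PySem.List.insertBy pvBef x acc) acc).Pairwise pvLe from
    h [] (by simp)
  induction xs with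
  | nil => intro acc h; simpa using h
  | cons a t ih => intro acc h; exact ih _ (pv_pairwise_insertBy a acc h)

-- Python's sorted on (length, char) pairs is the unique pvLe-pairwise rearrangement
theorem pv_sorted2_unique (xs ys : List (Int × Int)) (hp : ys.Perm xs) (hs : ys.Pairwise pvLe) :
    PySem.List.sorted2 xs (fun p => p.1) (fun p => p.2) false = ys :=
  List.Perm.eq_of_pairwise (fun _ _ _ _ h1 h2 => pvLe_antisymm h1 h2)
    (pv_pairwise_sorted2 xs) hs ((PySem.List.sorted2_perm xs _ _ false).trans hp.symm)

-- ---- the sorted symbol list is the blocks, concatenated ----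

def pvBlk (zs : List (Int × Int)) (l : Int) : List (Int × Int) :=
  (PySem.List.sorted (pvChars zs l) (fun x => x) false).map (fun c => (l, c))

theorem pv_mem_blk {zs : List (Int × Int)} {l : Int} {q : Int × Int} (h : q ∈ pvBlk zs l) :
    q.1 = l := by
  simp only [pvBlk, List.mem_map] at h
  obtain ⟨c, _, rfl⟩ := h; rfl

theorem pv_grp_pairwise (zs : List (Int × Int)) (ls : List Int) (h : ls.Pairwise (· < ·)) :
    (ls.flatMap (pvBlk zs)).Pairwise pvLe := by
  induction ls with
  | nil => simp
  | cons l t ih =>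
    rw [List.pairwise_cons] at h
    rw [List.flatMap_cons, List.pairwise_append]
    refine ⟨?_, ih h.2, ?_⟩
    · unfold pvBlk
      rw [List.pairwise_map]
      refine (PySem.List.sorted_pairwise (pvChars zs l) (fun x => x)).imp ?_
      intro a b hab; exact Or.inr ⟨rfl, hab⟩
    · intro a ha b hb
      rcases List.mem_flatMap.1 hb with ⟨l', hl', hb'⟩
      have h1 := pv_mem_blk ha
      have h2 := pv_mem_blk hb'
      exact Or.inl (by rw [h1, h2]; exact h.1 l' hl')

theorem pv_count_blk (zs : List (Int × Int)) (l : Int) (q : Int × Int) :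
    (pvBlk zs l).count q = if l = q.1 then (pvChars zs l).count q.2 else 0 := by
  obtain ⟨ql, qc⟩ := q
  by_cases h : l = ql
  · subst h
    rw [if_pos rfl]
    unfold pvBlk
    have hperm := (PySem.List.sorted_perm (pvChars zs l) (fun x => x) false).map (fun c => ((l : Int), c))
    rw [hperm.count_eq]
    simp only [List.count_eq_countP, List.countP_map]
    apply List.countP_congr
    intro c _
    simp only [Function.comp]
    constructor
    · intro hc; simpa using hc
    · intro hc; simp at hc; simp [hc]
  · rw [if_neg h]
    apply List.count_eq_zero.2
    intro hq; exact h (pv_mem_blk hq).symm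

theorem pv_sum_single (ls : List Int) (hnd : ls.Nodup) (l₀ : Int) (K : Nat) :
    (ls.map (fun l => if l = l₀ then K else 0)).sum = if l₀ ∈ ls then K else 0 := by
  induction ls with
  | nil => simp
  | cons a t ih =>
    rw [List.nodup_cons] at hnd
    by_cases h : a = l₀
    · subst h
      simp [hnd.1, ih hnd.2]
    · have := ih hnd.2
      simp only [List.map_cons, List.sum_cons, if_neg h, this, List.mem_cons]
      have : ¬ l₀ = a := fun hc => h hc.symm
      simp [this]

theorem pv_count_chars (zsP : List (Int × Int)) (q : Int × Int) :
    zsP.count q = (pvChars zsP q.1).count q.2 := by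
  unfold pvChars
  simp only [List.count_eq_countP, List.countP_map, List.countP_filter]
  apply List.countP_congr
  intro p _
  simp only [Function.comp]
  constructor
  · intro h; simp at h; simp [h]
  · intro h; simp at h
    have : p = q := Prod.ext h.2 h.1
    simp [this]

theorem pv_grp_perm (zs zsP : List (Int × Int)) (ls : List Int) (hnd : ls.Nodup)
    (h1 : ∀ l ∈ ls, pvChars zs l = pvChars zsP l)
    (h2 : ∀ p ∈ zsP, p.1 ∈ ls) :
    (ls.flatMap (pvBlk zs)).Perm zsP := by
  rw [List.perm_iff_count]
  intro q
  rw [List.count_flatMap, pv_count_chars zsP q]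
  have hmap : (ls.map (List.count q ∘ pvBlk zs)).sum
      = (ls.map (fun l => if l = q.1 then (pvChars zs l).count q.2 else 0)).sum := by
    congr 1
    apply List.map_congr_left
    intro l _
    simp only [Function.comp]
    exact pv_count_blk zs l q
  rw [hmap]
  by_cases hq : q.1 ∈ ls
  · have hs : (ls.map (fun l => if l = q.1 then (pvChars zs q.1).count q.2 else 0)).sum
        = if q.1 ∈ ls then (pvChars zs q.1).count q.2 else 0 := pv_sum_single ls hnd q.1 _
    have heq : (ls.map (fun l => if l = q.1 then (pvChars zs l).count q.2 else 0))
        = (ls.map (fun l => if l = q.1 then (pvChars zs q.1).count q.2 else 0)) := by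
      apply List.map_congr_left; intro l _
      by_cases h : l = q.1
      · subst h; rfl
      · simp [h]
    rw [heq, hs, if_pos hq, h1 q.1 hq]
  · have hz : (pvChars zsP q.1).count q.2 = 0 := by
      apply List.count_eq_zero.2
      intro hc
      simp only [pvChars, List.mem_map, List.mem_filter] at hc
      obtain ⟨p, ⟨hp, hpl⟩, hp2⟩ := hc
      have hp1 : p.1 = q.1 := by simpa using hpl
      exact hq (hp1 ▸ h2 p hp)
    rw [hz]
    have heq : (ls.map (fun l => if l = q.1 then (pvChars zs l).count q.2 else 0))
        = ls.map (fun _ => 0) := by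
      apply List.map_congr_left; intro l hl
      have : ¬ l = q.1 := fun hc => hq (hc ▸ hl)
      simp [this]
    rw [heq]; simp

-- ---- A's outer loop produces pvGo ----

def pvBlock (zs : List (Int × Int)) (l s : Int) : List ((Int × Int) × Int) :=
  (PySem.List.enumerate (PySem.List.sorted (pvChars zs l) (fun x => x) false) 0).map
    (fun p => ((l, s + p.1), p.2))

def pvGo (zs : List (Int × Int)) : List Int → Int → List ((Int × Int) × Int)
  | [], _ => []
  | l :: t, mc => pvBlock zs l mc ++ pvGo zs t ((mc + (pvChars zs l).length) * 2)

theorem pv_inner_items (l mc : Int) (cs : List Int) (h : PySem.Dict (Int × Int) Int)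
    (hfree : ∀ k ∈ h.keys, k.1 ≠ l) :
    ((PySem.List.enumerate cs 0).foldl (fun h p => h.insert (l, mc + p.1) p.2) h).items
      = h.items ++ (PySem.List.enumerate cs 0).map (fun p => ((l, mc + p.1), p.2)) := by
  apply PySem.Dict.items_foldl_insert_fresh (l := PySem.List.enumerate cs 0)
    (k := fun (p : Int × Int) => ((l, mc + p.1) : Int × Int)) (v := fun (p : Int × Int) => p.2) (d := h)
  · intro a _
    cases hc : h.contains (l, mc + a.1)
    · rfl
    · exact absurd rfl (hfree _ ((PySem.Dict.contains_iff_mem_keys _ _).1 hc))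
  · refine (List.pairwise_map).2 ?_
    refine (PySem.List.pairwise_lt_enumerate cs 0).imp ?_
    intro p q hlt heq
    have := congrArg (fun x => x.2) heq
    simp at this
    omega

theorem pv_inner_keys (l mc : Int) (cs : List Int) (h : PySem.Dict (Int × Int) Int) (k : Int × Int)
    (hk : k ∈ ((PySem.List.enumerate cs 0).foldl (fun h p => h.insert (l, mc + p.1) p.2) h).keys) :
    k ∈ h.keys ∨ k.1 = l := by
  have heq := PySem.Dict.keys_foldl_insert_key (l := PySem.List.enumerate cs 0)
    (key := fun (p : Int × Int) => ((l, mc + p.1) : Int × Int))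
    (f := fun _ (p : Int × Int) => p.2) (d := h)
  rw [heq, PySem.Set.mem_update] at hk
  rcases hk with hk | hk
  · exact Or.inl hk
  · right
    simp only [List.mem_map] at hk
    obtain ⟨p, _, rfl⟩ := hk
    rfl

theorem pv_Aloop (zs : List (Int × Int)) (ls : List Int) (h : PySem.Dict (Int × Int) Int) (mc : Int)
    (hpw : ls.Pairwise (· < ·)) (hkeys : ∀ k ∈ h.keys, ∀ l ∈ ls, k.1 < l) :
    ((ls.foldl
        (fun (st : PySem.Dict (Int × Int) Int × Int) l =>
          match (pvD zs).get? l with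
          | some characters =>
            ((PySem.List.enumerate (PySem.List.sorted characters (fun x => x) false) 0).foldl
               (fun h p => h.insert (l, st.2 + p.1) p.2) st.1,
             (st.2 + characters.length) * 2)
          | none => (st.1, st.2 * 2)) (h, mc)).1).items
      = h.items ++ pvGo zs ls mc := by
  induction ls generalizing h mc with
  | nil => simp [pvGo]
  | cons l t ih =>
    rw [List.pairwise_cons] at hpw
    rw [List.foldl_cons]
    rw [pvD_get? zs l]
    by_cases hc : pvChars zs l = []
    · rw [if_pos hc]
      show ((t.foldl _ (h, mc * 2)).1).items = _
      rw [ih h (mc * 2) hpw.2 (fun k hk l' hl' => hkeys k hk l' (List.mem_cons_of_mem l hl'))]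
      have : pvGo zs (l :: t) mc = pvBlock zs l mc ++ pvGo zs t ((mc + (pvChars zs l).length) * 2) := rfl
      have hb : pvBlock zs l mc = [] := by rw [pvBlock, hc]; rfl
      rw [this, hc, hb]
      simp
    · rw [if_neg hc]
      show ((t.foldl _
        ((PySem.List.enumerate (PySem.List.sorted (pvChars zs l) (fun x => x) false) 0).foldl
          (fun h p => h.insert (l, mc + p.1) p.2) h,
         (mc + (pvChars zs l).length) * 2)).1).items = _
      set h' := (PySem.List.enumerate (PySem.List.sorted (pvChars zs l) (fun x => x) false) 0).foldl
          (fun h p => h.insert (l, mc + p.1) p.2) h with hh'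
      have hkeys' : ∀ k ∈ h'.keys, ∀ l' ∈ t, k.1 < l' := by
        intro k hk l' hl'
        rcases pv_inner_keys l mc _ h k hk with hk' | hk'
        · exact hkeys k hk' l' (List.mem_cons_of_mem l hl')
        · rw [hk']; exact hpw.1 l' hl'
      rw [ih h' ((mc + (pvChars zs l).length) * 2) hpw.2 hkeys']
      rw [hh', pv_inner_items l mc _ h
        (fun k hk => ne_of_lt (hkeys k hk l List.mem_cons_self))]
      rw [List.append_assoc]
      rfl

-- ---- B's closed-form code, characterized ----

def pvFirst (ps : List (Int × Int)) (l : Int) : Int :=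
  ((ps.filter (fun r => decide (r.1 < l))).map (fun r => (2 : Int) ^ (l - r.1).toNat)).sum

def pvShort (ps : List (Int × Int)) (l : Int) : Int :=
  ((ps.filter (fun r => decide (r.1 < l))).map (fun _ => (1 : Int))).sum

def pvCnt (ps : List (Int × Int)) (l : Int) : Int :=
  ((ps.filter (fun r => r.1 == l)).length : Int)

theorem pvFirst_succ (ps : List (Int × Int)) (l : Int) :
    pvFirst ps (l + 1) = (pvFirst ps l + pvCnt ps l) * 2 := by
  induction ps with
  | nil => simp [pvFirst, pvCnt]
  | cons r t ih =>
    rcases lt_trichotomy r.1 l with h | h | h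
    · have h1 : ((l + 1) - r.1).toNat = (l - r.1).toNat + 1 := by omega
      simp only [pvFirst, pvCnt] at ih ⊢
      rw [List.filter_cons, List.filter_cons, List.filter_cons]
      rw [if_pos (by simp; omega), if_pos (by simp [h]), if_neg (by simp; omega)]
      rw [List.map_cons, List.map_cons, List.sum_cons, List.sum_cons, h1, pow_succ]
      push_cast at ih ⊢
      linarith [ih]
    · have h1 : ((l + 1) - r.1).toNat = 1 := by omega
      simp only [pvFirst, pvCnt] at ih ⊢
      rw [List.filter_cons, List.filter_cons, List.filter_cons]
      rw [if_pos (by simp; omega), if_neg (by simp [h]), if_pos (by simp [h])]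
      rw [List.map_cons, List.sum_cons, List.length_cons, h1]
      push_cast at ih ⊢
      linarith [ih]
    · simp only [pvFirst, pvCnt] at ih ⊢
      rw [List.filter_cons, List.filter_cons, List.filter_cons]
      rw [if_neg (by simp; omega), if_neg (by simp; omega), if_neg (by simp; omega)]
      exact ih

theorem pvShort_succ (ps : List (Int × Int)) (l : Int) :
    pvShort ps (l + 1) = pvShort ps l + pvCnt ps l := by
  induction ps with
  | nil => simp [pvShort, pvCnt]
  | cons r t ih =>
    rcases lt_trichotomy r.1 l with h | h | h
    · simp only [pvShort, pvCnt] at ih ⊢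
      rw [List.filter_cons, List.filter_cons, List.filter_cons]
      rw [if_pos (by simp; omega), if_pos (by simp [h]), if_neg (by simp; omega)]
      rw [List.map_cons, List.map_cons, List.sum_cons, List.sum_cons]
      linarith [ih]
    · simp only [pvShort, pvCnt] at ih ⊢
      rw [List.filter_cons, List.filter_cons, List.filter_cons]
      rw [if_pos (by simp; omega), if_neg (by simp [h]), if_pos (by simp [h])]
      rw [List.map_cons, List.sum_cons, List.length_cons]
      push_cast
      linarith [ih]
    · simp only [pvShort, pvCnt] at ih ⊢
      rw [List.filter_cons, List.filter_cons, List.filter_cons]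
      rw [if_neg (by simp; omega), if_neg (by simp; omega), if_neg (by simp; omega)]
      exact ih

theorem pv_filter_lt_one_nil (ps : List (Int × Int)) (hpos : ∀ r ∈ ps, 1 ≤ r.1) :
    ps.filter (fun r => decide (r.1 < 1)) = [] := by
  apply List.filter_eq_nil_iff.2
  intro r hr
  have := hpos r hr
  simp
  omega

-- enumerate of a mapped list
theorem pv_enum_map {α β : Type} (g : α → β) (xs : List α) (s : Int) :
    PySem.List.enumerate (xs.map g) s = (PySem.List.enumerate xs s).map (fun p => (p.1, g p.2)) := by
  induction xs generalizing s with
  | nil => rfl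
  | cons a t ih => simp [PySem.List.enumerate_cons, ih]

theorem pv_enum_shift (cs : List Int) (s : Int) :
    PySem.List.enumerate cs s = (PySem.List.enumerate cs 0).map (fun p => (s + p.1, p.2)) := by
  induction cs generalizing s with
  | nil => rfl
  | cons c t ih =>
    rw [PySem.List.enumerate_cons, PySem.List.enumerate_cons,
      show (0 : Int) + 1 = 1 by norm_num, ih (s + 1), ih 1, List.map_cons, List.map_map]
    refine congrArg₂ List.cons ?_ ?_
    all_goals simp [Prod.ext_iff, Function.comp]
    all_goals intro a b _
    all_goals omega

-- B's key for an enumerated pair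
def pvF (ps : List (Int × Int)) (q : Int × Int × Int) : (Int × Int) × Int :=
  ((q.2.1, pvFirst ps q.2.1 + q.1 - pvShort ps q.2.1), q.2.2)

-- one block, under B's closed form with the right start index, is A's pvBlock
theorem pv_block_map (zs ps : List (Int × Int)) (a : Int) :
    (PySem.List.enumerate (pvBlk zs a) (pvShort ps a)).map (pvF ps)
      = pvBlock zs a (pvFirst ps a) := by
  rw [pvBlk, pv_enum_map, pv_enum_shift, pvBlock, List.map_map, List.map_map]
  apply List.map_congr_left
  intro p _
  simp only [Function.comp, pvF]
  refine congrArg₂ Prod.mk (congrArg₂ Prod.mk rfl ?_) rfl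
  ring

theorem pv_Bgo (zs ps : List (Int × Int))
    (hc : ∀ l : Int, 1 ≤ l → pvCnt ps l = ((pvChars zs l).length : Int))
    (n : Nat) : ∀ (a : Int), 1 ≤ a →
    (PySem.List.enumerate ((PySem.List.pyRange a (a + n) 1).flatMap (pvBlk zs)) (pvShort ps a)).map (pvF ps)
      = pvGo zs (PySem.List.pyRange a (a + n) 1) (pvFirst ps a) := by
  induction n with
  | zero =>
    intro a _
    rw [show ((a : Int) + ((0 : Nat) : Int)) = a by simp, PySem.List.pyRange_one_eq_nil le_rfl]
    rfl
  | succ n ih =>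
    intro a ha
    have hb : (a : Int) + ((n + 1 : Nat) : Int) = (a + 1) + (n : Int) := by push_cast; ring
    rw [hb, PySem.List.pyRange_one_cons (by omega)]
    rw [List.flatMap_cons, PySem.List.enumerate_append, List.map_append, pv_block_map]
    have hlen : ((pvBlk zs a).length : Int) = pvCnt ps a := by
      rw [pvBlk, List.length_map, (PySem.List.sorted_perm _ _ _).length_eq, hc a ha]
    have hstart : pvShort ps a + ((pvBlk zs a).length : Int) = pvShort ps (a + 1) := by
      rw [hlen, pvShort_succ]
    have hmc : (pvFirst ps a + ((pvChars zs a).length : Int)) * 2 = pvFirst ps (a + 1) := by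
      rw [pvFirst_succ, hc a ha]
    show pvBlock zs a (pvFirst ps a)
        ++ (PySem.List.enumerate _ (pvShort ps a + ((pvBlk zs a).length : Int))).map (pvF ps)
      = pvBlock zs a (pvFirst ps a) ++ pvGo zs (PySem.List.pyRange (a + 1) (a + 1 + n) 1)
          ((pvFirst ps a + ((pvChars zs a).length : Int)) * 2)
    rw [hstart, hmc, ih (a + 1) (by omega)]

-- B's insert loop appends fresh keys: the produced items are the mapped enumerate list
theorem pv_B_items (ps : List (Int × Int)) :
    ((PySem.List.enumerate ps 0).foldl
        (fun (h : PySem.Dict (Int × Int) Int) q =>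
          h.insert (q.2.1,
            ((ps.filter (fun r => decide (r.1 < q.2.1))).map (fun r => (2 : Int) ^ (q.2.1 - r.1).toNat)).sum
              + q.1
              - ((ps.filter (fun r => decide (r.1 < q.2.1))).map (fun _ => (1 : Int))).sum)
            q.2.2)
        PySem.Dict.empty).items
      = (PySem.List.enumerate ps 0).map (pvF ps) := by
  have h := PySem.Dict.items_foldl_insert_fresh (l := PySem.List.enumerate ps 0)
    (k := fun (q : Int × Int × Int) =>
      ((q.2.1,
        ((ps.filter (fun r => decide (r.1 < q.2.1))).map (fun r => (2 : Int) ^ (q.2.1 - r.1).toNat)).sum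
          + q.1
          - ((ps.filter (fun r => decide (r.1 < q.2.1))).map (fun _ => (1 : Int))).sum) : Int × Int))
    (v := fun (q : Int × Int × Int) => q.2.2) (d := PySem.Dict.empty)
    ?_ ?_
  · rw [h]
    rfl
  · intro a _
    cases hcont : (PySem.Dict.empty : PySem.Dict (Int × Int) Int).contains _
    · rfl
    · have := (PySem.Dict.contains_iff_mem_keys _ _).1 hcont
      rw [PySem.Dict.keys_empty] at this
      simp at this
  · have hpw := PySem.List.pairwise_lt_enumerate ps 0
    refine hpw.map _ ?_
    intro p q hlt hpq
    have h1 := congrArg (fun x : Int × Int => x.1) hpq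
    have h2 := congrArg (fun x : Int × Int => x.2) hpq
    simp only at h1 h2
    rw [h1] at h2
    omega

theorem pv_chars_swap (xs : List (Int × Int)) (q : (Int × Int) → Bool) (l : Int) :
    pvChars ((xs.filter q).map (fun p => (p.2, p.1))) l
      = ((xs.filter (fun p => q p && p.2 == l)).map (fun p => p.1)) := by
  unfold pvChars
  rw [List.filter_map, List.map_map, List.filter_filter]
  have hpred : ∀ p : Int × Int,
      (((fun p : Int × Int => p.1 == l) ∘ fun p : Int × Int => (p.2, p.1)) p && q p)
        = (q p && p.2 == l) := by
    intro p; simp [Function.comp]; rw [Bool.and_comm]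
  rw [List.filter_congr (fun p _ => hpred p)]
  rfl

theorem pv_chars_zero (xs : List (Int × Int)) : pvChars (pvZs' xs) 0 = [] := by
  rw [pvZs'_eq, pv_chars_swap]
  rw [List.filter_eq_nil_iff.2 (fun p _ => by simp)]
  rfl

theorem pv_chars_pos (xs : List (Int × Int)) (l : Int) (hl : 1 ≤ l) :
    pvChars (pvZs' xs) l = pvChars (pvPos' xs) l := by
  rw [pvZs'_eq, pvPos'_eq, pv_chars_swap, pv_chars_swap]
  congr 1
  apply List.filter_congr
  intro p _
  rcases Decidable.em (p.2 = l) with h | h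
  · simp [h, show l ≠ 0 by omega, show (0 : Int) < l by omega]
  · have hb : (p.2 == l) = false := by simp [h]
    simp [hb]

set_option maxHeartbeats 1600000 in
theorem construct_huffman_spec : Claim_equal_construct_huffman := by
  intro al cl _ hpre
  unfold Spec_construct_huffman
  obtain ⟨p0, hp0, hp0ne⟩ := hpre
  have hA : (al.zip cl).foldl
      (fun d p => if p.2 ≠ 0 then d.modify p.2 [] (fun v => v ++ [p.1]) else d) PySem.Dict.empty
      = pvD (pvZs al cl) := by
    rw [pv_foldl_if_filter (q := fun p : Int × Int => p.2 ≠ 0), pvD, pvZs, List.foldl_map]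
  set zs := pvZs al cl with hzs
  have hzs' : zs = pvZs' (al.zip cl) := rfl
  have hp0zs : ((p0.2, p0.1) : Int × Int) ∈ zs := by
    rw [hzs, pvZs]
    exact List.mem_map.2 ⟨p0, List.mem_filter.2 ⟨hp0, by simp [hp0ne]⟩, rfl⟩
  have hkey_iff : ∀ y : Int, y ∈ (pvD zs).keys ↔ y ∈ zs.map (fun p => p.1) := by
    intro y; rw [pvD_keys, PySem.Set.mem_ofList]
  have hkeysne : (pvD zs).keys ≠ [] := by
    intro hnil
    have : p0.2 ∈ (pvD zs).keys := (hkey_iff p0.2).2 (List.mem_map.2 ⟨_, hp0zs, rfl⟩)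
    rw [hnil] at this
    simp at this
  obtain ⟨m, hm⟩ : ∃ m, PySem.List.max? (pvD zs).keys (fun x => x) = some m := by
    cases hmx : PySem.List.max? (pvD zs).keys (fun x => x) with
    | none => exact absurd ((PySem.List.max?_eq_none_iff _ _).1 hmx) hkeysne
    | some m => exact ⟨m, rfl⟩
  have hmmem : m ∈ (pvD zs).keys := PySem.List.max?_mem hm
  have hmmax : ∀ y ∈ (pvD zs).keys, y ≤ m := fun y hy => PySem.List.max?_isMax hm y hy
  have hm0 : m ≠ 0 := by
    intro h
    subst h
    exact (pv_mem_keys_iff zs 0).1 hmmem (by rw [hzs']; exact pv_chars_zero (al.zip cl))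
  have hAval : construct_huffman al cl
      = (pvGo zs (PySem.List.pyRange 0 (m + 1) 1) 0).map (fun q => (q.1.1, q.1.2, q.2)) := by
    simp only [construct_huffman, hA, hm]
    rw [pv_Aloop zs (PySem.List.pyRange 0 (m + 1) 1) PySem.Dict.empty 0
      (PySem.List.pairwise_lt_pyRange_one 0 (m + 1)) (by simp [PySem.Dict.keys_empty])]
    rfl
  by_cases hmpos : 1 ≤ m
  case neg =>
    -- all nonzero code lengths are negative: both sides are the empty dict
    have hposnil : (al.zip cl).filter (fun p => decide (0 < p.2)) = [] := by
      apply List.filter_eq_nil_iff.2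
      intro p hp
      simp only [decide_eq_true_eq]
      intro hplt
      have hpzs : ((p.2, p.1) : Int × Int) ∈ zs := by
        rw [hzs, pvZs]
        exact List.mem_map.2 ⟨p, List.mem_filter.2 ⟨hp, by simp; omega⟩, rfl⟩
      have : p.2 ≤ m := hmmax p.2 ((hkey_iff p.2).2 (List.mem_map.2 ⟨_, hpzs, rfl⟩))
      omega
    have hB : construct_huffman_alt al cl = [] := by
      simp only [construct_huffman_alt, hposnil]
      rfl
    rw [hAval, hB, PySem.List.pyRange_one_eq_nil (by omega)]
    rfl
  case pos =>
    set ls := PySem.List.pyRange 1 (m + 1) 1 with hls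
    have hlsmem : ∀ l : Int, l ∈ ls ↔ (1 ≤ l ∧ l < m + 1) := by
      intro l; rw [hls]; exact PySem.List.mem_pyRange_one
    have h1 : ∀ l ∈ ls, pvChars zs l = pvChars (pvPos' (al.zip cl)) l := by
      intro l hl
      rw [hzs']
      exact pv_chars_pos (al.zip cl) l ((hlsmem l).1 hl).1
    have h2 : ∀ p ∈ pvPos' (al.zip cl), p.1 ∈ ls := by
      intro p hp
      rw [pvPos'] at hp
      obtain ⟨q, hq, rfl⟩ := List.mem_map.1 hp
      rw [List.mem_filter] at hq
      have hqpos : 0 < q.2 := by simpa using hq.2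
      have hqzs : ((q.2, q.1) : Int × Int) ∈ zs := by
        rw [hzs, pvZs]
        exact List.mem_map.2 ⟨q, List.mem_filter.2 ⟨hq.1, by simp; omega⟩, rfl⟩
      have : q.2 ≤ m := hmmax q.2 ((hkey_iff q.2).2 (List.mem_map.2 ⟨_, hqzs, rfl⟩))
      exact (hlsmem q.2).2 ⟨by omega, by omega⟩
    have hperm : (ls.flatMap (pvBlk zs)).Perm (pvPos' (al.zip cl)) :=
      pv_grp_perm zs _ ls (PySem.List.nodup_pyRange_one 1 (m + 1)) h1 h2
    have hsym : PySem.List.sorted2 (pvPos' (al.zip cl)) (fun p => p.1) (fun p => p.2) false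
        = ls.flatMap (pvBlk zs) :=
      pv_sorted2_unique _ _ hperm (pv_grp_pairwise zs ls (PySem.List.pairwise_lt_pyRange_one 1 (m + 1)))
    set P := ls.flatMap (pvBlk zs) with hP
    have hPpos : ∀ r ∈ P, 1 ≤ r.1 := by
      intro r hr
      obtain ⟨l, hl, hrl⟩ := List.mem_flatMap.1 hr
      rw [pv_mem_blk hrl]
      exact ((hlsmem l).1 hl).1
    have hshort0 : pvShort P 1 = 0 := by
      rw [pvShort, pv_filter_lt_one_nil P hPpos]
      rfl
    have hfirst0 : pvFirst P 1 = 0 := by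
      rw [pvFirst, pv_filter_lt_one_nil P hPpos]
      rfl
    have hc : ∀ l : Int, 1 ≤ l → pvCnt P l = ((pvChars zs l).length : Int) := by
      intro l hl
      have hflen : (P.filter (fun r => r.1 == l)).length
          = ((pvPos' (al.zip cl)).filter (fun r => r.1 == l)).length :=
        (hperm.filter _).length_eq
      have hp2 : ((pvPos' (al.zip cl)).filter (fun r => r.1 == l)).length
          = (pvChars (pvPos' (al.zip cl)) l).length := by
        simp [pvChars]
      rw [pvCnt, hflen, hp2, ← pv_chars_pos (al.zip cl) l hl, ← hzs']
    have hgo := pv_Bgo zs P hc m.toNat 1 le_rfl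
    rw [show (1 : Int) + (m.toNat : Int) = m + 1 by omega, ← hls, ← hP, hshort0, hfirst0] at hgo
    have hBval : construct_huffman_alt al cl = (pvGo zs ls 0).map (fun q => (q.1.1, q.1.2, q.2)) := by
      simp only [construct_huffman_alt, ← pvPos'_eq, hsym]
      rw [pv_B_items P, hgo]
    -- drop the length-0 head of A's range
    have hch0 : pvChars zs 0 = [] := by rw [hzs']; exact pv_chars_zero (al.zip cl)
    have hGo : pvGo zs (PySem.List.pyRange 0 (m + 1) 1) 0 = pvGo zs ls 0 := by
      rw [PySem.List.pyRange_one_cons (by omega : (0 : Int) < m + 1)]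
      have hstep : pvGo zs (0 :: PySem.List.pyRange (0 + 1) (m + 1) 1) 0
          = pvBlock zs 0 0
            ++ pvGo zs (PySem.List.pyRange (0 + 1) (m + 1) 1)
              ((0 + ((pvChars zs 0).length : Int)) * 2) := rfl
      have hb0 : pvBlock zs 0 0 = [] := by rw [pvBlock, hch0]; rfl
      rw [hstep, hb0, hch0]
      rw [show ((0 : Int) + (([] : List Int).length : Int)) * 2 = 0 by norm_num]
      rw [show (0 : Int) + 1 = 1 by norm_num]
      exact List.nil_append _
    rw [hAval, hGo, hBval]
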